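-- pv_equiv track=rewrite | github.com/pypi-data/pypi-mirror-385 | packages/ppp-svc-helper/ppp_svc_helper-0.3.13-py3-none-any.whl/svc_helper/pitch/utils.py | get_voiced_segments
-- ===== SOURCE A (Python) =====
-- def get_voiced_segments(voiced_mask):
--     """Find start and end indices of voiced segments."""
--     segments = []
--     start = None
--
--     for i, is_voiced in enumerate(voiced_mask):
--         if is_voiced and start is None:
--             start = i
--         elif not is_voiced and start is not None:
--             segments.append((start, i))
--             start = None
--
--     if start is not None:  # Handle case where audio ends on voiced segment
--         segments.append((start, len(voiced_mask)))
--
--     return segments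
-- ===== SOURCE B (Python) =====
-- def get_voiced_segments(voiced_mask):
--     """Find start and end indices of voiced segments.
--
--     Edge detection: one pass collects segment starts (rising edges), a
--     second pass collects segment ends (falling edges, plus the list end
--     if it finishes voiced); the two lists are zipped into segments.
--     """
--     starts = []
--     prev = False
--     for i, cur in enumerate(voiced_mask):
--         if cur and not prev:
--             starts.append(i)
--         prev = cur
--     ends = []
--     prev = False
--     for i, cur in enumerate(voiced_mask):
--         if prev and not cur:
--             ends.append(i)
--         prev = cur
--     if prev:
--         ends.append(len(voiced_mask))
--     return list(zip(starts, ends))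
-- ===== Notes on version B (the rewrite author's own statement) =====
-- stated objective: alternative
-- what changed: Replaces the single stateful loop that tracks an Optional running start and appends finished (start,end) pairs by edge detection: one pass collecting rising-edge start indices, a second pass collecting falling-edge end indices (plus the trailing end), zipped together.
import Mathlib
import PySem

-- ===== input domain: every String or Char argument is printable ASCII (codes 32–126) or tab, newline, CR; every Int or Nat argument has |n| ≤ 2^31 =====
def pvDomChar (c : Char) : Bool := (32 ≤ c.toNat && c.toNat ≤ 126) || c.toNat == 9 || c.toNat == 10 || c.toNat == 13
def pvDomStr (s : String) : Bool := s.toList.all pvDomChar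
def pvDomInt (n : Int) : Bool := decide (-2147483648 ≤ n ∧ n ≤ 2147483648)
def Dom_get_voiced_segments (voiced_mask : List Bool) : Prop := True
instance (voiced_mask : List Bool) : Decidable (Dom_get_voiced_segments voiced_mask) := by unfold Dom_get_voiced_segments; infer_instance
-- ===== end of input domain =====

-- B replaces A's single stateful running-start loop by two edge-detection
-- passes (starts = rising edges, ends = falling edges + trailing end) zipped
-- together; same O(n) cost, different decomposition.

-- ===== PORT A =====
-- the for-loop of A as structural recursion over the same state
-- (index i, optional running start, accumulated segments)
def pvLoopA (xs : List Bool) (i : Int) (start : Option Int)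
    (segs : List (Int × Int)) : List (Int × Int) :=
  match xs with
  | [] =>
    -- after the loop: if start is not None, append (start, len(voiced_mask));
    -- at the end of the traversal i equals len(voiced_mask)
    match start with
    | some s => segs ++ [(s, i)]
    | none => segs
  | b :: t =>
    if b && start.isNone then pvLoopA t (i + 1) (some i) segs
    else if !b && start.isSome then
      pvLoopA t (i + 1) none (segs ++ [((start.getD 0), i)])
    else pvLoopA t (i + 1) start segs

def get_voiced_segments (voiced_mask : List Bool) : List (Int × Int) :=
  pvLoopA voiced_mask 0 none []

-- ===== PORT B =====
-- first loop of Source B: collect rising-edge indices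
def pvStartsB (xs : List Bool) (prev : Bool) (i : Int) (acc : List Int) : List Int :=
  match xs with
  | [] => acc
  | c :: t => pvStartsB t c (i + 1) (if c && !prev then acc ++ [i] else acc)

-- second loop of Source B: collect falling-edge indices, return final prev
def pvEndsB (xs : List Bool) (prev : Bool) (i : Int) (acc : List Int) : List Int × Bool :=
  match xs with
  | [] => (acc, prev)
  | c :: t => pvEndsB t c (i + 1) (if prev && !c then acc ++ [i] else acc)

def get_voiced_segments_alt (voiced_mask : List Bool) : List (Int × Int) :=
  let starts := pvStartsB voiced_mask false 0 []
  let r := pvEndsB voiced_mask false 0 []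
  let ends := if r.2 then r.1 ++ [(voiced_mask.length : Int)] else r.1
  starts.zip ends

-- ===== PRECONDITION & SPEC =====
def Spec_get_voiced_segments (voiced_mask : List Bool) (out : List (Int × Int)) : Prop := out = get_voiced_segments_alt voiced_mask
instance (voiced_mask : List Bool) (out : List (Int × Int)) : Decidable (Spec_get_voiced_segments voiced_mask out) := by unfold Spec_get_voiced_segments; infer_instance

-- ===== CLAIM (what is proved, stated in full; the proofs are below) =====
def Claim_equal_get_voiced_segments : Prop := ∀ (voiced_mask : List Bool), Dom_get_voiced_segments voiced_mask → Spec_get_voiced_segments voiced_mask (get_voiced_segments voiced_mask)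

-- ===== LEMMAS AND PROOFS =====

-- pure (accumulator-free) versions of the loops
def pvS (prev : Bool) (i : Int) : List Bool → List Int
  | [] => []
  | c :: t => (if c && !prev then [i] else []) ++ pvS c (i + 1) t

def pvFb (prev : Bool) (i : Int) : List Bool → List Int
  | [] => []
  | c :: t => (if prev && !c then [i] else []) ++ pvFb c (i + 1) t

def pvLast (prev : Bool) : List Bool → Bool
  | [] => prev
  | c :: t => pvLast c t

-- ends including the trailing end-of-list closure
def pvF (prev : Bool) (i : Int) : List Bool → List Int
  | [] => if prev then [i] else []
  | c :: t => (if prev && !c then [i] else []) ++ pvF c (i + 1) t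

-- pure version of A's loop
def pvZ (start : Option Int) (i : Int) : List Bool → List (Int × Int)
  | [] => match start with
          | some s => [(s, i)]
          | none => []
  | c :: t => match start with
          | none => if c then pvZ (some i) (i + 1) t else pvZ none (i + 1) t
          | some s => if c then pvZ (some s) (i + 1) t else (s, i) :: pvZ none (i + 1) t

theorem pvLoopA_eq (xs : List Bool) : ∀ (i : Int) (start : Option Int) (segs : List (Int × Int)),
    pvLoopA xs i start segs = segs ++ pvZ start i xs := by
  induction xs with
  | nil => intro i start segs; cases start <;> simp [pvLoopA, pvZ]
  | cons c t ih =>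
    intro i start segs
    cases start <;> cases c <;> simp [pvLoopA, pvZ, ih]

theorem pvStartsB_eq (xs : List Bool) : ∀ (prev : Bool) (i : Int) (acc : List Int),
    pvStartsB xs prev i acc = acc ++ pvS prev i xs := by
  induction xs with
  | nil => intro prev i acc; simp [pvStartsB, pvS]
  | cons c t ih =>
    intro prev i acc
    by_cases h : (c && !prev) = true <;> simp [pvStartsB, pvS, h, ih]

theorem pvEndsB_eq (xs : List Bool) : ∀ (prev : Bool) (i : Int) (acc : List Int),
    pvEndsB xs prev i acc = (acc ++ pvFb prev i xs, pvLast prev xs) := by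
  induction xs with
  | nil => intro prev i acc; simp [pvEndsB, pvFb, pvLast]
  | cons c t ih =>
    intro prev i acc
    by_cases h : (prev && !c) = true <;> simp [pvEndsB, pvFb, pvLast, h, ih]

theorem pvF_decomp (xs : List Bool) : ∀ (prev : Bool) (i : Int),
    pvF prev i xs = pvFb prev i xs ++ (if pvLast prev xs then [i + (xs.length : Int)] else []) := by
  induction xs with
  | nil => intro prev i; cases prev <;> simp [pvF, pvFb, pvLast]
  | cons c t ih =>
    intro prev i
    have : i + 1 + (t.length : Int) = i + ((t.length : Int) + 1) := by ring
    simp [pvF, pvFb, pvLast, ih, this]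

theorem pvZ_eq_zip (xs : List Bool) : ∀ (i : Int),
    (∀ s : Int, pvZ (some s) i xs = (s :: pvS true i xs).zip (pvF true i xs)) ∧
    (pvZ none i xs = (pvS false i xs).zip (pvF false i xs)) := by
  induction xs with
  | nil => intro i; constructor <;> simp [pvZ, pvS, pvF]
  | cons c t ih =>
    intro i
    constructor
    · intro s
      cases c
      · simp [pvZ, pvS, pvF, (ih (i + 1)).2]
      · simpa [pvZ, pvS, pvF] using (ih (i + 1)).1 s
    · cases c
      · simp [pvZ, pvS, pvF, (ih (i + 1)).2]
      · simpa [pvZ, pvS, pvF] using (ih (i + 1)).1 i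

-- ===== VERDICT (by name: the statement is the Claim_ definition above) =====
theorem get_voiced_segments_spec : Claim_equal_get_voiced_segments := by
  intro m _
  show get_voiced_segments m = get_voiced_segments_alt m
  rw [get_voiced_segments, get_voiced_segments_alt, pvLoopA_eq, pvStartsB_eq, pvEndsB_eq]
  simp only [List.nil_append]
  rw [(pvZ_eq_zip m 0).2, pvF_decomp]
  split_ifs <;> simp
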